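-- pv_equiv track=rewrite | github.com/okdesign21/Bibliography-Libby-Available | bibliography_status.py | looks_non_english_ascii
-- ===== SOURCE A (Python) =====
-- def looks_non_english_ascii(title: str) -> bool:
--     """Heuristic for ASCII titles that *look* non-English (common ES/DE/FR articles)."""
--     s = f" {title.lower()} "
--     tokens = [
--         " el ", " la ", " los ", " las ", " del ", " de ", " y ",
--         " der ", " die ", " das ", " und ",
--         " le ", " les ", " des ", " du ", " et ",
--         " una ", " uno ", " un "
--     ]
--     return any(tok in s for tok in tokens)
-- ===== SOURCE B (Python) =====
-- TRIGGERS = frozenset({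
--     "el", "la", "los", "las", "del", "de", "y",
--     "der", "die", "das", "und",
--     "le", "les", "des", "du", "et",
--     "una", "uno", "un",
-- })
--
--
-- def looks_non_english_ascii(title: str) -> bool:
--     """One linear scan: accumulate space-delimited words and test each against a set."""
--     word = ""
--     for ch in title.lower() + " ":
--         if ch == " ":
--             if word in TRIGGERS:
--                 return True
--             word = ""
--         else:
--             word += ch
--     return False
-- ===== Notes on version B (the rewrite author's own statement) =====
-- stated objective: alternative
-- what changed: A pads the lowered title with spaces and runs 19 separate substring scans (one per trigger token); B makes one linear pass over the characters, accumulating each space-delimited word and testing it against a frozenset of trigger words, returning at the first hit.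
import Mathlib
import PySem

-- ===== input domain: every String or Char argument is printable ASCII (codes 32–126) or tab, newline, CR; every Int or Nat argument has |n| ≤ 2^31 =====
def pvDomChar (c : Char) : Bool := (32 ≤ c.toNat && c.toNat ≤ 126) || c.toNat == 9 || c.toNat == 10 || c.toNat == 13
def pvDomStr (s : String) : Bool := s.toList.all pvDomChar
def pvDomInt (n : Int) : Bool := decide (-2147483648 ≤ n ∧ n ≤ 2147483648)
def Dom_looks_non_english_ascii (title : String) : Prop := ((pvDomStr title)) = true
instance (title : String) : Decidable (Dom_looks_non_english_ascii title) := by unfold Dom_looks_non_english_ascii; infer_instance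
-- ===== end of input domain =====

-- B replaces A's 19 substring scans over the padded title by one linear scan that
-- accumulates space-delimited words and tests each against a set (objective: alternative).


-- ===== PORT A =====
def looks_non_english_ascii (title : String) : Bool :=
  let s : List Char := ' ' :: PySem.Chars.lower title.toList ++ [' ']
  let tokens : List (List Char) :=
    [" el ".toList, " la ".toList, " los ".toList, " las ".toList, " del ".toList,
     " de ".toList, " y ".toList,
     " der ".toList, " die ".toList, " das ".toList, " und ".toList,
     " le ".toList, " les ".toList, " des ".toList, " du ".toList, " et ".toList,
     " una ".toList, " uno ".toList, " un ".toList]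
  tokens.any (fun tok => PySem.Chars.isIn tok s)

-- ===== PORT B =====
def pvTriggers : PySem.Set (List Char) :=
  PySem.Set.ofList
    ["el".toList, "la".toList, "los".toList, "las".toList, "del".toList,
     "de".toList, "y".toList,
     "der".toList, "die".toList, "das".toList, "und".toList,
     "le".toList, "les".toList, "des".toList, "du".toList, "et".toList,
     "una".toList, "uno".toList, "un".toList]

-- the for-loop of Source B: one pass over the characters, `cur` is the word built so far
def pvScan : List Char → List Char → Bool
  | [], _ => false
  | c :: rest, cur =>
    if c = ' ' then (PySem.Set.contains pvTriggers cur || pvScan rest [])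
    else pvScan rest (cur ++ [c])

def looks_non_english_ascii_alt (title : String) : Bool :=
  pvScan (PySem.Chars.lower title.toList ++ [' ']) []

-- ===== PRECONDITION & SPEC =====
def Spec_looks_non_english_ascii (title : String) (out : Bool) : Prop := out = looks_non_english_ascii_alt title
instance (title : String) (out : Bool) : Decidable (Spec_looks_non_english_ascii title out) := by unfold Spec_looks_non_english_ascii; infer_instance

-- ===== CLAIM (what is proved, stated in full; the proofs are below) =====
def Claim_equal_looks_non_english_ascii : Prop := ∀ (title : String), Dom_looks_non_english_ascii title → Spec_looks_non_english_ascii title (looks_non_english_ascii title)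

-- ===== LEMMAS AND PROOFS =====

-- the trigger words, as a plain list (proof-side mirror of pvTriggers)
def pvTrigList : List (List Char) :=
  ["el".toList, "la".toList, "los".toList, "las".toList, "del".toList,
   "de".toList, "y".toList,
   "der".toList, "die".toList, "das".toList, "und".toList,
   "le".toList, "les".toList, "des".toList, "du".toList, "et".toList,
   "una".toList, "uno".toList, "un".toList]

-- prefix characterisation: a space-free word followed by ' ' is a prefix of l ++ [' ']
-- iff it is the first space-delimited word of l
theorem pvPrefix_iff_headI (w l : List Char) (hw : ' ' ∉ w) :
    (w ++ [' ']) <+: (l ++ [' ']) ↔ w = (l.splitOnP (· == ' ')).headI := by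
  induction l generalizing w with
  | nil =>
    cases w with
    | nil => simp
    | cons a w' =>
      simp only [List.splitOnP_nil, List.headI]
      constructor
      · intro h
        rcases List.cons_prefix_cons.mp h with ⟨ha, _⟩
        exact absurd (by rw [ha]; exact List.mem_cons_self : ' ' ∈ a :: w') hw
      · intro h; exact absurd h (by simp)
  | cons c l' ih =>
    by_cases hc : c = ' '
    · subst hc
      simp only [List.splitOnP_cons, beq_self_eq_true, if_pos, List.headI]
      cases w with
      | nil => simp
      | cons a w' =>
        constructor
        · intro h
          rcases List.cons_prefix_cons.mp h with ⟨ha, _⟩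
          exact absurd ha (by intro he; exact hw (he ▸ List.mem_cons_self))
        · intro h; exact absurd h (by simp)
    · obtain ⟨h, t, hht⟩ := List.exists_cons_of_ne_nil (List.splitOnP_ne_nil (· == ' ') l')
      simp only [List.splitOnP_cons, beq_iff_eq, hc, hht, List.modifyHead_cons, List.headI]
      cases w with
      | nil =>
        simp only [List.nil_append]
        constructor
        · intro hp
          rcases List.cons_prefix_cons.mp hp with ⟨ha, _⟩
          exact absurd ha.symm hc
        · intro h; exact absurd h (by simp)
      | cons a w' =>
        have hw' : ' ' ∉ w' := fun h => hw (List.mem_cons_of_mem _ h)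
        constructor
        · intro hp
          rcases List.cons_prefix_cons.mp hp with ⟨ha, hp'⟩
          have := (ih w' hw').mp hp'
          rw [hht] at this
          simp only [List.headI] at this
          simp [ha, this]
        · intro h
          rcases List.cons.injEq .. ▸ h with ⟨ha, hw2⟩
          rw [List.cons_append]
          apply List.cons_prefix_cons.mpr
          refine ⟨ha, ?_⟩
          apply (ih w' hw').mpr
          rw [hht]; simpa using hw2

-- infix characterisation: a padded space-free word is inside l ++ [' ']
-- iff it is one of the non-first space-delimited words of l
theorem pvInfix_iff_mem_tail (w l : List Char) (hw : ' ' ∉ w) :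
    ((' ' :: w ++ [' ']) <:+: (l ++ [' '])) ↔ w ∈ (l.splitOnP (· == ' ')).tail := by
  induction l with
  | nil =>
    simp only [List.nil_append, List.splitOnP_nil, List.tail_cons, List.not_mem_nil, iff_false]
    intro h
    have := h.length_le
    simp at this
  | cons c l' ih =>
    simp only [List.cons_append]
    rw [List.infix_cons_iff]
    by_cases hc : c = ' '
    · subst hc
      obtain ⟨h, t, hht⟩ := List.exists_cons_of_ne_nil (List.splitOnP_ne_nil (· == ' ') l')
      simp only [List.splitOnP_cons, beq_self_eq_true, if_pos, List.tail_cons, hht,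
        List.mem_cons]
      rw [hht] at ih
      simp only [List.tail_cons] at ih
      constructor
      · rintro (hp | hi)
        · obtain ⟨-, hp'⟩ := List.cons_prefix_cons.mp hp
          left
          have := (pvPrefix_iff_headI w l' hw).mp hp'
          rw [hht] at this; simpa using this
        · right; exact ih.mp hi
      · rintro (hw1 | hw2)
        · left
          apply List.cons_prefix_cons.mpr
          refine ⟨rfl, (pvPrefix_iff_headI w l' hw).mpr ?_⟩
          rw [hht]; simpa using hw1
        · right; exact ih.mpr hw2
    · obtain ⟨h, t, hht⟩ := List.exists_cons_of_ne_nil (List.splitOnP_ne_nil (· == ' ') l')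
      simp only [List.splitOnP_cons, beq_iff_eq, hc, hht, List.modifyHead_cons]
      rw [hht] at ih
      simp only [List.tail_cons] at ih
      constructor
      · rintro (hp | hi)
        · rcases List.cons_prefix_cons.mp hp with ⟨ha, _⟩
          exact absurd ha.symm hc
        · exact ih.mp hi
      · intro hm; right; exact ih.mpr hm

-- the scan of Source B computes membership of the words of l (first word extended by cur)
theorem pvScan_eq (l : List Char) (cur : List Char) :
    pvScan (l ++ [' ']) cur =
      (PySem.Set.contains pvTriggers (cur ++ (l.splitOnP (· == ' ')).headI)
        || ((l.splitOnP (· == ' ')).tail).any (PySem.Set.contains pvTriggers)) := by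
  induction l generalizing cur with
  | nil => simp [pvScan]
  | cons c l' ih =>
    obtain ⟨h, t, hht⟩ := List.exists_cons_of_ne_nil (List.splitOnP_ne_nil (· == ' ') l')
    by_cases hc : c = ' '
    · subst hc
      simp only [List.cons_append, pvScan, if_pos, List.splitOnP_cons, beq_self_eq_true,
        List.headI, List.tail_cons, List.append_nil]
      rw [ih [], hht]
      simp
    · simp only [List.cons_append, pvScan, hc, List.splitOnP_cons, beq_iff_eq,
        hht, List.modifyHead_cons, List.headI]
      rw [ih (cur ++ [c]), hht]
      simp [List.append_assoc]

theorem pvTrigList_no_space : ∀ w ∈ pvTrigList, ' ' ∉ w := by decide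

theorem pvTriggers_eq : (pvTriggers : List (List Char)) = pvTrigList := by decide

theorem pvTokens_eq :
    ([" el ".toList, " la ".toList, " los ".toList, " las ".toList, " del ".toList,
      " de ".toList, " y ".toList,
      " der ".toList, " die ".toList, " das ".toList, " und ".toList,
      " le ".toList, " les ".toList, " des ".toList, " du ".toList, " et ".toList,
      " una ".toList, " uno ".toList, " un ".toList] : List (List Char))
      = pvTrigList.map (fun w => ' ' :: w ++ [' ']) := by decide

-- ===== VERDICT (by name: the statement is the Claim_ definition above) =====
theorem looks_non_english_ascii_spec : Claim_equal_looks_non_english_ascii := by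
  intro title _
  unfold Spec_looks_non_english_ascii looks_non_english_ascii looks_non_english_ascii_alt
  set l : List Char := PySem.Chars.lower title.toList with hl
  obtain ⟨h, t, hht⟩ := List.exists_cons_of_ne_nil (List.splitOnP_ne_nil (· == ' ') l)
  rw [pvTokens_eq, pvScan_eq, hht]
  simp only [List.any_map, List.headI, List.tail_cons, List.nil_append]
  rw [Bool.eq_iff_iff]
  simp only [List.any_eq_true, Function.comp_apply, PySem.Chars.isIn_iff_infix,
    PySem.Set.contains_iff, Bool.or_eq_true]
  constructor
  · rintro ⟨w, hwmem, hwinf⟩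
    have hsp := pvTrigList_no_space w hwmem
    have hwt : w ∈ pvTriggers := by rw [pvTriggers_eq]; exact hwmem
    have hmem : w = h ∨ w ∈ t := by
      have := (pvInfix_iff_mem_tail w (' ' :: l) hsp).mp (by simpa using hwinf)
      simpa [List.splitOnP_cons, hht] using this
    rcases hmem with rfl | hmem
    · exact Or.inl hwt
    · exact Or.inr ⟨w, hmem, hwt⟩
  · intro hb
    have hex : ∃ w, (w = h ∨ w ∈ t) ∧ w ∈ pvTrigList := by
      rcases hb with hh | ⟨x, hx, hxT⟩
      · exact ⟨h, Or.inl rfl, by rw [← pvTriggers_eq]; exact hh⟩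
      · exact ⟨x, Or.inr hx, by rw [← pvTriggers_eq]; exact hxT⟩
    rcases hex with ⟨w, hwsplit, hwtrig⟩
    refine ⟨w, hwtrig, ?_⟩
    have hsp := pvTrigList_no_space w hwtrig
    have hres : (' ' :: w ++ [' ']) <:+: ((' ' :: l) ++ [' ']) := by
      apply (pvInfix_iff_mem_tail w (' ' :: l) hsp).mpr
      simp only [List.splitOnP_cons, beq_self_eq_true, if_pos, List.tail_cons, hht,
        List.mem_cons]
      exact hwsplit
    simpa using hres
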